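-- pv_equiv track=rewrite | github.com/09rd193/eca_search | eca_search.py | serch
-- ===== SOURCE A (Python) =====
-- import math
--
-- def onestep(line):
--   newline = ''
--   for i in range(len(line)):
--     if len(line) == 1:
--       return '10'
--     x, z = '0', '0'
--     if i == 0:
--       x, z = '0', line[i + 1]
--       if line[i] == '1':
--         newline = '1' + newline
--     elif i == len(line) - 1:
--       x, z = line[i - 1], '0'
--     else:
--       x, z = line[i - 1], line[i + 1]
--     newline += '0' if x == z else '1'
--   return newline
--
-- def inititem(target):
--   digit = int(math.log2(target))
--   intitem = 2 ** digit
--   stritem = format(intitem, 'b')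
--   _stritem = '1'
--   while len(_stritem) <= len(stritem):
--     _stritem = _stritem + '0' * len(_stritem)
--   stritem = _stritem[:int(-len(_stritem) / 2)]
--   return stritem
--
-- def serch(target):
--   item, tmp = inititem(target), ''
--   integer = int(item, 2)
--   while True:
--     if target == integer:
--       break
--     elif target < integer:
--       item = tmp
--       break
--     else:
--       tmp = item
--     item = onestep(item)
--     integer = int(item, 2)
--   return item
-- ===== SOURCE B (Python) =====
-- import math
--
-- def serch(target):
--     e = target.bit_length() - 1
--     L = 1
--     while L <= e + 1:
--         L *= 2
--     m = L // 2 - 1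
--
--     def row(t):
--         # state after t steps = Pascal row t mod 2: bit m+t-2j set iff C(t,j) is odd
--         return sum(1 << (m + t - 2 * j)
--                    for j in range(t + 1)
--                    if math.comb(t, j) % 2 == 1 and 2 * j <= m + t)
--
--     t, n = 0, 1 << m
--     while n < target:
--         t += 1
--         n = row(t)
--     return format(n, 'b') if n == target else format(row(t - 1), 'b')
-- ===== Notes on version B (the rewrite author's own statement) =====
-- stated objective: alternative
-- what changed: B never applies the neighbor-XOR step rule at all: it computes each CA state directly from the closed form 'bit m+t-2j of state t is set iff C(t,j) is odd' (Pascal-row parity / Lucas), searching over the step count t, whereas A simulates the automaton state-by-state with a per-character string loop.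
-- outside the precondition, e.g. on serch(0): A raises ValueError, B raises ValueError
import Mathlib
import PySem

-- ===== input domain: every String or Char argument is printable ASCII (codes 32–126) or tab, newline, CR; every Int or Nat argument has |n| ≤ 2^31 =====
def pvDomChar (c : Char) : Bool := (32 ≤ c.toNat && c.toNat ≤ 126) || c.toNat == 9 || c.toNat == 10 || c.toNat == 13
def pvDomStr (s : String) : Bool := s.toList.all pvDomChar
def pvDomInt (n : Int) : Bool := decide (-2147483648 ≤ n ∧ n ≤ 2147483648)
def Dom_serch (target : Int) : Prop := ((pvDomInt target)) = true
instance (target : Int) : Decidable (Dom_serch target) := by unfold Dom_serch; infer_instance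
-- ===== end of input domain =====

-- B replaces A's step-by-step cellular-automaton simulation by a closed form for each
-- state (Pascal-row parity: bit m+t-2j of state t is set iff C(t,j) is odd), searching
-- over the step count t (objective: alternative); return value only, nothing is mutated.

-- ===== PORT A =====

-- port of format(n, 'b') (used by A in inititem and by both at the final formatting)
def fmtBin (n : Nat) : List Char :=
  if n < 2 then [if n = 1 then '1' else '0']
  else fmtBin (n / 2) ++ [if n % 2 = 1 then '1' else '0']
decreasing_by exact Nat.div_lt_self (Nat.lt_of_lt_of_le Nat.zero_lt_two (Nat.le_of_not_lt (by assumption))) Nat.one_lt_two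

-- port of int(s, 2); exact here: every string A parses consists of '0'/'1' only and is nonempty
def parseBin (l : List Char) : Nat :=
  l.foldl (fun a c => 2 * a + (if c = '1' then 1 else 0)) 0

-- the 'for i in range(len(line))' loop of onestep; all indexing is in range in each branch,
-- so getD is exact
def onestepGo (line : List Char) (i : Nat) (newline : List Char) : List Char :=
  if _h : i < line.length then
    if line.length = 1 then ['1', '0']
    else if i = 0 then
      let z := line.getD (i + 1) ' '
      let newline := if line.getD i ' ' = '1' then '1' :: newline else newline
      onestepGo line (i + 1) (newline ++ [if '0' = z then '0' else '1'])
    else if i = line.length - 1 then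
      let x := line.getD (i - 1) ' '
      onestepGo line (i + 1) (newline ++ [if x = '0' then '0' else '1'])
    else
      onestepGo line (i + 1)
        (newline ++ [if line.getD (i - 1) ' ' = line.getD (i + 1) ' ' then '0' else '1'])
  else newline
termination_by line.length - i
decreasing_by all_goals exact Nat.sub_succ_lt_self _ _ _h

def onestep (line : List Char) : List Char := onestepGo line 0 []

-- the '_stritem = _stritem + "0"*len(_stritem)' while loop; fueled (the length doubles each
-- step, so fuel digit+2 is never exhausted on the domain)
def dblLoop (bound : Nat) : Nat → List Char → List Char
  | 0, s => s
  | fuel + 1, s => if s.length ≤ bound then dblLoop bound fuel (s ++ List.replicate s.length '0') else s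

-- int(math.log2(target)) ported as Nat.log 2; exact for 1 ≤ target ≤ 2^31 (the float log2
-- of such integers never rounds across an integer)
def inititem (target : Int) : List Char :=
  let digit := Nat.log 2 target.toNat
  let intitem := 2 ^ digit
  let stritem := fmtBin intitem
  let s := dblLoop stritem.length (digit + 2) ['1']
  s.take (s.length - s.length / 2)   -- _stritem[:int(-len(_stritem)/2)]

-- the 'while True' search loop; fueled (the integer at least doubles each step, so fuel 64
-- is never exhausted for target ≤ 2^31)
def serchLoop (target : Int) : Nat → List Char → List Char → List Char
  | 0, item, _ => item
  | fuel + 1, item, tmp =>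
    let integer : Int := (parseBin item : Int)
    if target = integer then item
    else if target < integer then tmp
    else serchLoop target fuel (onestep item) item

def serch (target : Int) : String := String.mk (serchLoop target 64 (inititem target) [])

-- ===== PORT B =====

-- the 'while L <= e + 1: L *= 2' loop; fueled, never exhausted on the domain
def lLoopI (bound : Int) : Nat → Nat → Nat
  | 0, l => l
  | fuel + 1, l => if (l : Int) ≤ bound then lLoopI bound fuel (2 * l) else l

-- row(t): sum(1 << (m+t-2j) for j in range(t+1) if comb(t,j) % 2 == 1 and 2j <= m+t);
-- math.comb ported as Nat.choose; range(t+1) of a negative int is empty, hence .toNat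
def rowB (m : Nat) (t : Int) : Nat :=
  (List.range (t + 1).toNat).foldl
    (fun s j => if Nat.choose t.toNat j % 2 = 1 ∧ 2 * j ≤ m + t.toNat then s + 1 <<< (m + t.toNat - 2 * j) else s) 0

-- the 'while n < target: t += 1; n = row(t)' loop; fueled, never exhausted on the domain
def bLoop (target : Int) (m : Nat) : Nat → Int → Nat → Int × Nat
  | 0, t, n => (t, n)
  | fuel + 1, t, n =>
    if (n : Int) < target then bLoop target m fuel (t + 1) (rowB m (t + 1)) else (t, n)

-- target.bit_length() ported as Nat.size of natAbs (Python: bit length of |target|)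
def serch_alt (target : Int) : String :=
  let e : Int := (Nat.size target.natAbs : Int) - 1
  let L := lLoopI (e + 1) 64 1
  let m : Int := ((L / 2 : Nat) : Int) - 1
  let r := bLoop target m.toNat 64 0 (1 <<< m.toNat)
  if (r.2 : Int) = target then String.mk (fmtBin r.2) else String.mk (fmtBin (rowB m.toNat (r.1 - 1)))

-- ===== PRECONDITION & SPEC =====
-- A raises ValueError (math.log2 of a non-positive number) for target ≤ 0; Pre_ excludes exactly those.
def Pre_serch (target : Int) : Prop := 1 ≤ target
instance (target : Int) : Decidable (Pre_serch target) := by unfold Pre_serch; infer_instance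
def pvWitness_serch : Int := (6)

def Spec_serch (target : Int) (out : String) : Prop := out = serch_alt target
instance (target : Int) (out : String) : Decidable (Spec_serch target out) := by unfold Spec_serch; infer_instance

-- ===== CLAIM (what is proved, stated in full; the proofs are below) =====
def Claim_equal_serch : Prop := ∀ (target : Int), Dom_serch target → Pre_serch target → Spec_serch target (serch target)

-- ===== LEMMAS AND PROOFS =====

-- the binary string (msb first, no leading zeros) of n, as bit tests
def bitsAux (n L : Nat) : List Char :=
  (List.range L).map (fun p => if n.testBit (L - 1 - p) then '1' else '0')

def binStr (n : Nat) : List Char := bitsAux n (Nat.size n)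

-- proof-side Nat form of the port's row, plus the doubling loop with a Nat bound
def rowBN (m t : Nat) : Nat :=
  (List.range (t + 1)).foldl
    (fun s j => if Nat.choose t j % 2 = 1 ∧ 2 * j ≤ m + t then s + 1 <<< (m + t - 2 * j) else s) 0

def lLoop (bound : Nat) : Nat → Nat → Nat
  | 0, l => l
  | fuel + 1, l => if l ≤ bound then lLoop bound fuel (2 * l) else l

theorem rowB_cast (m t : Nat) : rowB m (t : Int) = rowBN m t := by
  have h1 : ((t : Int) + 1).toNat = t + 1 := by omega
  have h2 : (t : Int).toNat = t := by omega
  rw [rowB, rowBN, h1, h2]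

theorem lLoopI_eq (bound : Int) (hb : 0 ≤ bound) :
    ∀ (fuel l : Nat), lLoopI bound fuel l = lLoop bound.toNat fuel l := by
  intro fuel
  induction fuel with
  | zero => intro l; rfl
  | succ fuel ih =>
    intro l
    rw [lLoopI, lLoop]
    by_cases hc : (l : Int) ≤ bound
    · rw [if_pos hc, if_pos (by omega), ih]
    · rw [if_neg hc, if_neg (by omega)]

theorem lLoop_congr (bound : Nat) :
    ∀ (fuel1 : Nat), ∀ {fuel2 s : Nat}, bound < s * 2 ^ fuel1 → bound < s * 2 ^ fuel2 →
      lLoop bound fuel1 s = lLoop bound fuel2 s := by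
  intro fuel1
  induction fuel1 with
  | zero =>
    intro fuel2 s h1 h2
    simp only [pow_zero, mul_one] at h1
    cases fuel2 with
    | zero => rfl
    | succ fuel2 => rw [lLoop, lLoop, if_neg (by omega)]
  | succ fuel1 ih =>
    intro fuel2 s h1 h2
    cases fuel2 with
    | zero =>
      simp only [pow_zero, mul_one] at h2
      rw [lLoop, lLoop, if_neg (by omega)]
    | succ fuel2 =>
      rw [lLoop, lLoop]
      by_cases hc : s ≤ bound
      · rw [if_pos hc, if_pos hc]
        exact ih (by rw [show 2 * s * 2 ^ fuel1 = s * 2 ^ (fuel1 + 1) by ring]; exact h1)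
          (by rw [show 2 * s * 2 ^ fuel2 = s * 2 ^ (fuel2 + 1) by ring]; exact h2)
      · rw [if_neg hc, if_neg hc]

-- proof-side description of one CA step on the integer value
def stepN (n : Nat) : Nat := (n <<< 1) ^^^ (n >>> 1)

theorem testBit_div_mod (x i : Nat) : x.testBit i = decide (x / 2 ^ i % 2 = 1) := by
  simp only [Nat.testBit, Nat.shiftRight_eq_div_pow, Nat.and_one_is_mod]
  rcases Nat.mod_two_eq_zero_or_one (x / 2 ^ i) with h | h <;> simp [h]

theorem mod_two_pow_succ (x L : Nat) :
    x % 2 ^ (L + 1) = 2 ^ L * (x.testBit L).toNat + x % 2 ^ L := by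
  have h := Nat.mod_mul (a := 2 ^ L) (b := 2) (x := x)
  rw [testBit_div_mod]
  rcases Nat.mod_two_eq_zero_or_one (x / 2 ^ L) with hm | hm <;>
    simp [pow_succ, h, hm] <;> omega

theorem size_eq_log (n : Nat) (h : 1 ≤ n) : Nat.size n = Nat.log 2 n + 1 := by
  have h1 : Nat.log 2 n < Nat.size n := Nat.lt_size.mpr (Nat.pow_log_le_self 2 (by omega))
  have h2 : Nat.size n ≤ Nat.log 2 n + 1 := Nat.size_le.mpr (Nat.lt_pow_succ_log_self (by omega) n)
  omega

theorem size_pow' (k : Nat) : Nat.size (2 ^ k) = k + 1 := by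
  have h1 : k < Nat.size (2 ^ k) := Nat.lt_size.mpr (le_refl _)
  have h2 : Nat.size (2 ^ k) ≤ k + 1 := Nat.size_le.mpr (by
    exact Nat.pow_lt_pow_right (by norm_num) (by omega))
  omega

theorem bitsAux_length (n L : Nat) : (bitsAux n L).length = L := by
  simp [bitsAux]

theorem binStr_length (n : Nat) : (binStr n).length = Nat.size n := bitsAux_length _ _

-- cons decomposition (high bit first)
theorem bitsAux_succ (n L : Nat) :
    bitsAux n (L + 1) = (if n.testBit L then '1' else '0') :: bitsAux n L := by
  simp only [bitsAux, List.range_succ_eq_map, List.map_cons, List.map_map]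
  refine List.cons_eq_cons.mpr ⟨by simp, List.map_congr_left ?_⟩
  intro p hp
  have h1 : L - (p + 1) = L - 1 - p := by omega
  simp [h1]

-- snoc decomposition (low bit last)
theorem bitsAux_snoc (n L : Nat) :
    bitsAux n (L + 1) = bitsAux (n / 2) L ++ [if n.testBit 0 then '1' else '0'] := by
  simp only [bitsAux, List.range_succ, List.map_append, List.map_cons, List.map_nil]
  congr 1
  · apply List.map_congr_left
    intro p hp
    have hpL := List.mem_range.mp hp
    have h1 : L + 1 - 1 - p = (L - 1 - p) + 1 := by omega
    rw [h1, Nat.testBit_succ]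
  · simp

theorem parseBin_go (n L : Nat) (acc : Nat) :
    (bitsAux n L).foldl (fun a c => 2 * a + (if c = '1' then 1 else 0)) acc
      = acc * 2 ^ L + n % 2 ^ L := by
  induction L generalizing acc with
  | zero => simp [bitsAux, Nat.mod_one]
  | succ L ih =>
    rw [bitsAux_succ, List.foldl_cons, ih, mod_two_pow_succ]
    rcases hb : n.testBit L <;> simp [hb] <;> ring

theorem parseBin_binStr (n : Nat) : parseBin (binStr n) = n := by
  have h := parseBin_go n (Nat.size n) 0
  have hlt : n < 2 ^ Nat.size n := Nat.lt_size_self n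
  simpa [parseBin, binStr, Nat.mod_eq_of_lt hlt] using h

theorem size_div_succ (n : Nat) (h : 1 ≤ n) : Nat.size n = Nat.size (n / 2) + 1 := by
  rcases Nat.lt_or_ge n 2 with h2 | h2
  · have h1 : n = 1 := by omega
    subst h1; simp [Nat.size_one, Nat.size_zero]
  · have hd : 1 ≤ n / 2 := by omega
    have e1 := size_eq_log n h
    have e2 := size_eq_log (n / 2) hd
    have e3 : Nat.log 2 (n / 2) = Nat.log 2 n - 1 := Nat.log_div_base 2 n
    have hpos : 0 < Nat.log 2 n := Nat.log_pos (by norm_num) h2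
    omega

theorem fmtBin_eq_binStr (n : Nat) (h : 1 ≤ n) : fmtBin n = binStr n := by
  induction n using Nat.strong_induction_on with
  | _ n ih =>
    rw [fmtBin]
    by_cases h2 : n < 2
    · have h1 : n = 1 := by omega
      subst h1
      simp [binStr, bitsAux, Nat.size_one, List.range_succ]
    · rw [if_neg h2]
      have hd : 1 ≤ n / 2 := by omega
      rw [ih (n / 2) (by omega) hd]
      rw [binStr, binStr, size_div_succ n h, bitsAux_snoc]
      congr 1
      rw [testBit_div_mod]
      simp

theorem binStr_pow (k : Nat) : binStr (2 ^ k) = '1' :: List.replicate k '0' := by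
  rw [binStr, size_pow']
  apply List.ext_getElem
  · simp [bitsAux_length]
  · intro p h1 h2
    have hlen : p < k + 1 := by simpa [bitsAux_length] using h1
    simp only [bitsAux, List.getElem_map, List.getElem_range]
    cases p with
    | zero => simp [Nat.testBit_two_pow]
    | succ q =>
      have hne2 : ¬ (k = k - (q + 1)) := by omega
      simp [Nat.testBit_two_pow, hne2]

-- top bit of a positive number is set
theorem testBit_size_pred (n : Nat) (h : 1 ≤ n) : n.testBit (Nat.size n - 1) = true := by
  have hsz : 1 ≤ Nat.size n := Nat.lt_size.mpr (by simpa using h)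
  have h1 : 2 ^ (Nat.size n - 1) ≤ n := Nat.lt_size.mp (by omega)
  have h2 : n < 2 ^ Nat.size n := Nat.lt_size_self n
  rw [testBit_div_mod]
  have hdiv : n / 2 ^ (Nat.size n - 1) = 1 := by
    apply Nat.div_eq_of_lt_le (by simpa using h1)
    have h3 : Nat.size n = (Nat.size n - 1) + 1 := by omega
    calc n < 2 ^ Nat.size n := h2
    _ = Nat.succ 1 * 2 ^ (Nat.size n - 1) := by
        conv_lhs => rw [h3]
        rw [pow_succ]; ring
  simp [hdiv]

theorem stepN_testBit (n t : Nat) :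
    (stepN n).testBit t = ((if 1 ≤ t then n.testBit (t - 1) else false) ^^ n.testBit (t + 1)) := by
  unfold stepN
  rw [Nat.testBit_xor, Nat.testBit_shiftLeft, Nat.testBit_shiftRight]
  by_cases h1 : 1 ≤ t
  · simp [h1, Nat.add_comm]
  · have h0 : t = 0 := by omega
    subst h0; simp

theorem stepN_size (n : Nat) (h : 1 ≤ n) : Nat.size (stepN n) = Nat.size n + 1 := by
  have hlt : n < 2 ^ Nat.size n := Nat.lt_size_self n
  have hL1 : 1 ≤ Nat.size n := Nat.lt_size.mpr (by simpa using h)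
  have htop : (stepN n).testBit (Nat.size n) = true := by
    rw [stepN_testBit]
    have h1 : n.testBit (Nat.size n - 1) = true := testBit_size_pred n h
    have h2 : n.testBit (Nat.size n + 1) = false :=
      Nat.testBit_lt_two_pow (lt_of_lt_of_le hlt (Nat.pow_le_pow_right (by norm_num) (by omega)))
    simp [h1, h2, hL1]
  have hub : stepN n < 2 ^ (Nat.size n + 1) := by
    apply Nat.xor_lt_two_pow
    · rw [Nat.shiftLeft_eq, pow_succ]
      exact Nat.mul_lt_mul_of_lt_of_le hlt (by norm_num) (by norm_num)
    · rw [Nat.shiftRight_eq_div_pow]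
      exact lt_of_le_of_lt (le_trans (Nat.div_le_self _ _) (le_of_lt hlt))
        (Nat.pow_lt_pow_right (by norm_num) (by omega))
  have lo : Nat.size n < Nat.size (stepN n) := Nat.lt_size.mpr (Nat.ge_two_pow_of_testBit htop)
  have hi : Nat.size (stepN n) ≤ Nat.size n + 1 := Nat.size_le.mpr hub
  omega

theorem binStr_getD (n j : Nat) (hj : j < Nat.size n) :
    (binStr n).getD j ' ' = if n.testBit (Nat.size n - 1 - j) then '1' else '0' := by
  rw [List.getD_eq_getElem _ _ (by rw [binStr_length]; exact hj)]
  simp [binStr, bitsAux]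

-- the body of A's loop for 1 ≤ i (the two non-initial branches)
def midChar (line : List Char) (p : Nat) : Char :=
  if p = line.length - 1 then (if line.getD (p - 1) ' ' = '0' then '0' else '1')
  else (if line.getD (p - 1) ' ' = line.getD (p + 1) ' ' then '0' else '1')

theorem onestepGo_mid (line : List Char) (hlen : 2 ≤ line.length) :
    ∀ (k i : Nat), 1 ≤ i → line.length - i = k → ∀ acc,
    onestepGo line i acc = acc ++ (List.range k).map (fun j => midChar line (i + j)) := by
  intro k
  induction k with
  | zero =>
    intro i h1 hk acc
    rw [onestepGo, dif_neg (by omega)]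
    simp
  | succ k ih =>
    intro i h1 hk acc
    have hi : i < line.length := by omega
    have hsplit : (List.range (k + 1)).map (fun j => midChar line (i + j))
        = midChar line i :: (List.range k).map (fun j => midChar line (i + 1 + j)) := by
      rw [List.range_succ_eq_map, List.map_cons, List.map_map]
      refine List.cons_eq_cons.mpr ⟨by simp, List.map_congr_left ?_⟩
      intro j hj
      simp only [Function.comp_apply]
      congr 1
      omega
    rw [onestepGo, dif_pos hi, if_neg (by omega), if_neg (by omega)]
    by_cases hlast : i = line.length - 1
    · rw [if_pos hlast, ih (i + 1) (by omega) (by omega), hsplit]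
      have hmid : midChar line i = if line.getD (i - 1) ' ' = '0' then '0' else '1' := by
        rw [midChar, if_pos hlast]
      rw [hmid]
      simp
    · rw [if_neg hlast, ih (i + 1) (by omega) (by omega), hsplit]
      have hmid : midChar line i
          = if line.getD (i - 1) ' ' = line.getD (i + 1) ' ' then '0' else '1' := by
        rw [midChar, if_neg hlast]
      rw [hmid]
      simp

-- the key A-side lemma: onestep on the binary string is the bit-arithmetic step
theorem onestep_binStr (n : Nat) (h : 1 ≤ n) : onestep (binStr n) = binStr (stepN n) := by
  rcases Nat.lt_or_ge n 2 with hsm | h2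
  · have h1 : n = 1 := by omega
    subst h1
    have hb1 : binStr 1 = ['1'] := by
      rw [binStr, Nat.size_one]; decide
    have hs1 : stepN 1 = 2 := by decide
    have hsz2 : Nat.size 2 = 2 := by
      simpa using size_pow' 1
    have hb2 : binStr 2 = ['1', '0'] := by
      rw [binStr, hsz2]; decide
    rw [hb1, hs1, hb2, onestep, onestepGo]
    simp
  · have hL2 : 2 ≤ Nat.size n := by
      have := Nat.lt_size.mpr (show 2 ^ 1 ≤ n by simpa using h2); omega
    set L := Nat.size n with hL
    have hlen : (binStr n).length = L := binStr_length n
    have hlt : n < 2 ^ L := hL ▸ Nat.lt_size_self n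
    have htop : n.testBit (L - 1) = true := hL ▸ testBit_size_pred n h
    have hhi : ∀ t, L ≤ t → n.testBit t = false := fun t ht =>
      Nat.testBit_lt_two_pow (lt_of_lt_of_le hlt (Nat.pow_le_pow_right (by norm_num) ht))
    have h0 : (binStr n).getD 0 ' ' = '1' := by
      rw [binStr_getD n 0 (by omega)]
      simp only [← hL, Nat.sub_zero]
      rw [htop]
      simp
    rw [onestep, onestepGo, dif_pos (by omega), if_neg (by omega), if_pos rfl]
    simp only [h0, if_true, zero_add, eq_self_iff_true]
    rw [onestepGo_mid (binStr n) (by omega) (L - 1) 1 (by omega) (by omega)]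
    have hbm : binStr (stepN n) = bitsAux (stepN n) (L + 1) := by
      rw [binStr, stepN_size n h, ← hL]
    rw [hbm]
    apply List.ext_getElem
    · simp [bitsAux_length, hlen]
      omega
    · intro p hp1 hp2
      have hpL : p < L + 1 := by simpa [bitsAux_length] using hp2
      simp only [bitsAux, List.getElem_map, List.getElem_range]
      rcases p with _ | _ | q
      · rw [stepN_testBit]
        have e1 : L + 1 - 1 - 0 = L := by omega
        rw [e1]
        have e2 : n.testBit (L - 1) = true := htop
        rw [if_pos (by omega : 1 ≤ L), e2, hhi (L + 1) (by omega)]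
        simp
      · simp only [List.cons_append, List.nil_append, List.getElem_cons_succ,
          List.getElem_cons_zero]
        rw [binStr_getD n 1 (by omega), ← hL]
        have e1 : L + 1 - 1 - 1 = L - 1 := by omega
        rw [e1, stepN_testBit, if_pos (by omega : 1 ≤ L - 1)]
        have e2 : L - 1 - 1 = L - 2 := by omega
        have e3 : L - 1 + 1 = L := by omega
        rw [e2, e3, hhi L (by omega)]
        rcases hb : n.testBit (L - 2) <;> simp [hb]
      · simp only [List.cons_append, List.nil_append, List.getElem_cons_succ]
        rw [List.getElem_map, List.getElem_range]
        have hq : q + 2 < L + 1 := hpL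
        have hmc : (1 : Nat) + q = q + 1 := by omega
        rw [hmc, midChar, hlen]
        by_cases hql : q + 1 = L - 1
        · rw [if_pos hql]
          have e0 : q + 1 - 1 = L - 2 := by omega
          rw [e0, binStr_getD n (L - 2) (by omega), ← hL]
          have e1 : L - 1 - (L - 2) = 1 := by omega
          rw [e1]
          have e2 : L + 1 - 1 - (q + 1 + 1) = 0 := by omega
          rw [e2, stepN_testBit]
          rw [if_neg (by omega : ¬ 1 ≤ 0)]
          rcases hb : n.testBit 1 <;> simp [hb]
        · rw [if_neg hql]
          have hqlt : q + 1 < L - 1 := by omega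
          have e0 : q + 1 - 1 = q := by omega
          rw [e0, binStr_getD n q (by omega), binStr_getD n (q + 2) (by omega), ← hL]
          have e1 : L + 1 - 1 - (q + 1 + 1) = L - q - 2 := by omega
          rw [e1, stepN_testBit, if_pos (by omega : 1 ≤ L - q - 2)]
          have e2 : L - 1 - q = L - q - 2 + 1 := by omega
          have e3 : L - 1 - (q + 2) = L - q - 2 - 1 := by omega
          rw [e2, e3]
          rcases hb1 : n.testBit (L - q - 2 + 1) <;> rcases hb2 : n.testBit (L - q - 2 - 1) <;>
            simp [hb1, hb2]

-- the doubling string loop mirrors the doubling nat loop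
theorem dbl_lLoop (bound : Nat) : ∀ (fuel j : Nat), 2 ^ j / 2 ≤ bound →
    dblLoop bound fuel ('1' :: List.replicate (2 ^ j - 1) '0')
        = '1' :: List.replicate (lLoop bound fuel (2 ^ j) - 1) '0'
      ∧ (∃ j', lLoop bound fuel (2 ^ j) = 2 ^ j')
      ∧ lLoop bound fuel (2 ^ j) / 2 ≤ bound := by
  intro fuel
  induction fuel with
  | zero => intro j hj; exact ⟨rfl, ⟨j, rfl⟩, hj⟩
  | succ fuel ih =>
    intro j hj
    have hp : 1 ≤ 2 ^ j := Nat.one_le_two_pow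
    have hlen : ('1' :: List.replicate (2 ^ j - 1) '0').length = 2 ^ j := by
      simp; omega
    rw [dblLoop, lLoop, hlen]
    by_cases hc : 2 ^ j ≤ bound
    · rw [if_pos hc, if_pos hc]
      have hgrow : ('1' :: List.replicate (2 ^ j - 1) '0') ++ List.replicate (2 ^ j) '0'
          = '1' :: List.replicate (2 ^ (j + 1) - 1) '0' := by
        rw [List.cons_append, List.replicate_append_replicate]
        have he : 2 ^ j - 1 + 2 ^ j = 2 ^ (j + 1) - 1 := by
          have : 2 ^ (j + 1) = 2 * 2 ^ j := by ring
          omega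
        rw [he]
      have h2 : 2 * 2 ^ j = 2 ^ (j + 1) := by ring
      rw [hgrow, h2]
      refine ih (j + 1) ?_
      have : 2 ^ (j + 1) = 2 * 2 ^ j := by ring
      omega
    · rw [if_neg hc, if_neg hc]
      exact ⟨rfl, ⟨j, rfl⟩, hj⟩

-- lLoop passes its bound if given enough fuel
theorem lLoop_gt (bound : Nat) : ∀ (fuel s : Nat), bound < s * 2 ^ fuel →
    bound < lLoop bound fuel s := by
  intro fuel
  induction fuel with
  | zero => intro s h; simpa [lLoop] using by simpa using h
  | succ fuel ih =>
    intro s h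
    rw [lLoop]
    by_cases hc : s ≤ bound
    · rw [if_pos hc]
      apply ih
      have : 2 * s * 2 ^ fuel = s * 2 ^ (fuel + 1) := by ring
      omega
    · rw [if_neg hc]; omega

theorem init_equiv (t : Int) (ht : 1 ≤ t) :
    inititem t = binStr (1 <<< (lLoop (Nat.size t.toNat - 1 + 1) (Nat.size t.toNat - 1 + 2) 1 / 2 - 1))
      ∧ ((1 <<< (lLoop (Nat.size t.toNat - 1 + 1) (Nat.size t.toNat - 1 + 2) 1 / 2 - 1) : Nat) : Int) ≤ t := by
  have ht1 : 1 ≤ t.toNat := by omega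
  have hse : Nat.size t.toNat - 1 = Nat.log 2 t.toNat := by rw [size_eq_log _ ht1]; omega
  rw [hse]
  set d := Nat.log 2 t.toNat with hd
  obtain ⟨hs, ⟨j', hj'⟩, hle⟩ := dbl_lLoop (d + 1) (d + 2) 0 (by simp)
  rw [pow_zero] at hs hj' hle
  set l := lLoop (d + 1) (d + 2) 1 with hl
  have hl1 : 1 ≤ l := hj' ▸ Nat.one_le_two_pow
  have hs' : dblLoop (d + 1) (d + 2) ['1'] = '1' :: List.replicate (l - 1) '0' := by
    simpa using hs
  have hstr : (fmtBin (2 ^ d)).length = d + 1 := by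
    rw [fmtBin_eq_binStr _ Nat.one_le_two_pow, binStr_length, size_pow']
  have heq : l - l / 2 - 1 = l / 2 - 1 := by
    rcases j' with _ | j''
    · simp at hj'; omega
    · have h2 : l = 2 * 2 ^ j'' := by rw [hj']; ring
      omega
  constructor
  · simp only [inititem]
    rw [← hd, hstr, hs']
    have hlen : ('1' :: List.replicate (l - 1) '0').length = l := by simp; omega
    rw [hlen]
    have htake : ('1' :: List.replicate (l - 1) '0').take (l - l / 2)
        = '1' :: List.replicate (l - l / 2 - 1) '0' := by
      have h1 : l - l / 2 = (l - l / 2 - 1) + 1 := by omega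
      rw [h1, List.take_succ_cons, List.take_replicate]
      congr 2
      omega
    rw [htake, heq, Nat.one_shiftLeft, binStr_pow]
  · rw [Nat.one_shiftLeft]
    have h1 : l / 2 - 1 ≤ d := by omega
    have h2 : (2 : Nat) ^ (l / 2 - 1) ≤ 2 ^ d := Nat.pow_le_pow_right (by norm_num) h1
    have h3 : 2 ^ d ≤ t.toNat := Nat.pow_log_le_self 2 (by omega)
    omega

-- ===== bit characterization of rowB =====

theorem testBit_add_pow (a i b : Nat) (h : a.testBit i = false) :
    (a + 2 ^ i).testBit b = (a.testBit b || decide (b = i)) := by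
  have hpos : 0 < 2 ^ (i + 1) := by positivity
  set q := a / 2 ^ (i + 1) with hq
  set r := a % 2 ^ (i + 1) with hr
  have hr2 : r < 2 ^ (i + 1) := Nat.mod_lt _ hpos
  have ha : a = 2 ^ (i + 1) * q + r := (Nat.div_add_mod a (2 ^ (i + 1))).symm
  have hri : r.testBit i = false := by
    rw [hr, Nat.testBit_mod_two_pow]
    simp [h]
  have hpow : (2 : Nat) ^ (i + 1) = 2 * 2 ^ i := by ring
  have hrlt : r < 2 ^ i := by
    rw [testBit_div_mod] at hri
    have hd : r / 2 ^ i < 2 := by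
      apply Nat.div_lt_of_lt_mul; omega
    simp at hri
    rcases Nat.lt_or_ge r (2 ^ i) with h' | h'
    · exact h'
    · exfalso
      have : r / 2 ^ i = 1 := by
        have := Nat.le_div_iff_mul_le (k := 2 ^ i) (by positivity) |>.mpr (by omega : 1 * 2 ^ i ≤ r)
        omega
      omega
  have key : a + 2 ^ i = 2 ^ (i + 1) * q + (r + 2 ^ i) := by omega
  have hab : a.testBit b = if b < i + 1 then r.testBit b else q.testBit (b - (i + 1)) := by
    conv_lhs => rw [ha]
    rw [Nat.testBit_two_pow_mul_add q hr2 b]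
  rw [key, Nat.testBit_two_pow_mul_add q (show r + 2 ^ i < 2 ^ (i + 1) by omega) b, hab]
  by_cases hb : b < i + 1
  · rw [if_pos hb, if_pos hb]
    have hsplit : r + 2 ^ i = 2 ^ i * 1 + r := by omega
    rw [hsplit, Nat.testBit_two_pow_mul_add 1 hrlt b]
    by_cases hbi : b < i
    · rw [if_pos hbi]
      simp [show ¬(b = i) by omega]
    · have hbe : b = i := by omega
      subst hbe
      rw [if_neg (lt_irrefl b)]
      simp [hri]
  · rw [if_neg hb, if_neg hb]
    simp [show ¬(b = i) by omega]

theorem sum_testBit (m t : Nat) : ∀ (k b : Nat),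
    ((((List.range k).map
        (fun j => if Nat.choose t j % 2 = 1 ∧ 2 * j ≤ m + t then 2 ^ (m + t - 2 * j) else 0)).sum).testBit b = true)
    ↔ ∃ j, j < k ∧ Nat.choose t j % 2 = 1 ∧ 2 * j ≤ m + t ∧ m + t - 2 * j = b := by
  intro k
  induction k with
  | zero => intro b; simp
  | succ k ih =>
    intro b
    rw [List.range_succ, List.map_append, List.sum_append]
    simp only [List.map_cons, List.map_nil, List.sum_cons, List.sum_nil, add_zero]
    by_cases hc : Nat.choose t k % 2 = 1 ∧ 2 * k ≤ m + t
    · rw [if_pos hc]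
      have hfree : (((List.range k).map
          (fun j => if Nat.choose t j % 2 = 1 ∧ 2 * j ≤ m + t then 2 ^ (m + t - 2 * j) else 0)).sum).testBit (m + t - 2 * k) = false := by
        apply Bool.eq_false_iff.mpr
        intro hx
        obtain ⟨j, hj, _, hle, he⟩ := (ih _).mp hx
        omega
      rw [testBit_add_pow _ _ _ hfree]
      simp only [Bool.or_eq_true, decide_eq_true_eq, ih]
      constructor
      · rintro (⟨j, hj, h1, h2, h3⟩ | hbe)
        · exact ⟨j, by omega, h1, h2, h3⟩
        · exact ⟨k, by omega, hc.1, hc.2, by omega⟩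
      · rintro ⟨j, hj, h1, h2, h3⟩
        by_cases hjk : j = k
        · right; omega
        · left; exact ⟨j, by omega, h1, h2, h3⟩
    · rw [if_neg hc, add_zero, ih]
      constructor
      · rintro ⟨j, hj, h1, h2, h3⟩; exact ⟨j, by omega, h1, h2, h3⟩
      · rintro ⟨j, hj, h1, h2, h3⟩
        by_cases hjk : j = k
        · exact absurd ⟨hjk ▸ h1, hjk ▸ h2⟩ hc
        · exact ⟨j, by omega, h1, h2, h3⟩

theorem foldl_if_add (p : Nat → Prop) [DecidablePred p] (g : Nat → Nat) :
    ∀ (l : List Nat) (a : Nat),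
      l.foldl (fun s j => if p j then s + g j else s) a
        = a + (l.map (fun j => if p j then g j else 0)).sum := by
  intro l
  induction l with
  | nil => intro a; simp
  | cons x xs ih =>
    intro a
    rw [List.foldl_cons, List.map_cons, List.sum_cons, ih]
    by_cases hp : p x <;> simp [hp] <;> omega

theorem rowBN_eq_sum (m t : Nat) :
    rowBN m t = ((List.range (t + 1)).map
        (fun j => if Nat.choose t j % 2 = 1 ∧ 2 * j ≤ m + t then 2 ^ (m + t - 2 * j) else 0)).sum := by
  rw [rowBN, foldl_if_add]
  simp [Nat.one_shiftLeft]

theorem rowBN_testBit (m t b : Nat) :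
    ((rowBN m t).testBit b = true)
    ↔ ∃ j, j < t + 1 ∧ Nat.choose t j % 2 = 1 ∧ 2 * j ≤ m + t ∧ m + t - 2 * j = b := by
  rw [rowBN_eq_sum]
  exact sum_testBit m t (t + 1) b

theorem rowBN_testBit_false (m t b : Nat)
    (h : ¬ ∃ j, j < t + 1 ∧ Nat.choose t j % 2 = 1 ∧ 2 * j ≤ m + t ∧ m + t - 2 * j = b) :
    (rowBN m t).testBit b = false :=
  Bool.eq_false_iff.mpr (fun hx => h ((rowBN_testBit m t b).mp hx))

theorem rowBN_top (m t : Nat) : (rowBN m t).testBit (m + t) = true :=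
  (rowBN_testBit m t (m + t)).mpr ⟨0, by simp⟩

theorem rowBN_lt (m t : Nat) : rowBN m t < 2 ^ (m + t + 1) := by
  have hmod : rowBN m t % 2 ^ (m + t + 1) = rowBN m t := by
    apply Nat.eq_of_testBit_eq
    intro i
    rw [Nat.testBit_mod_two_pow]
    by_cases hi : i < m + t + 1
    · simp [hi]
    · rw [rowBN_testBit_false m t i (by rintro ⟨j, hj, _, hle, he⟩; omega)]
      simp [hi]
  calc rowBN m t = rowBN m t % 2 ^ (m + t + 1) := hmod.symm
  _ < 2 ^ (m + t + 1) := Nat.mod_lt _ (by positivity)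

theorem rowBN_pos (m t : Nat) : 1 ≤ rowBN m t :=
  le_trans Nat.one_le_two_pow (Nat.ge_two_pow_of_testBit (rowBN_top m t))

theorem rowBN_size (m t : Nat) : Nat.size (rowBN m t) = m + t + 1 := by
  have lo : m + t < Nat.size (rowBN m t) :=
    Nat.lt_size.mpr (Nat.ge_two_pow_of_testBit (rowBN_top m t))
  have hi : Nat.size (rowBN m t) ≤ m + t + 1 := Nat.size_le.mpr (rowBN_lt m t)
  omega

theorem rowBN_zero (m : Nat) : rowBN m 0 = 2 ^ m := by
  simp [rowBN, List.range_one, Nat.one_shiftLeft]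

-- the Pascal-row closed form steps like the CA (for t ≤ m, where no truncation occurs)
theorem step_row (m t : Nat) (h : t ≤ m) : rowBN m (t + 1) = stepN (rowBN m t) := by
  apply Nat.eq_of_testBit_eq
  intro b
  rw [stepN_testBit]
  rcases Nat.eq_zero_or_pos b with hb0 | hb1
  · subst hb0
    rw [if_neg (by omega : ¬ (1 : Nat) ≤ 0), Bool.false_xor]
    by_cases h2 : ∃ j, j < t + 1 ∧ Nat.choose t j % 2 = 1 ∧ 2 * j ≤ m + t ∧ m + t - 2 * j = 0 + 1
    · rw [(rowBN_testBit m t (0 + 1)).mpr h2]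
      obtain ⟨j2, hj2, ho2, hle2, he2⟩ := h2
      have hjt : j2 = t := by omega
      have hm : m = t + 1 := by omega
      apply (rowBN_testBit m (t + 1) 0).mpr
      exact ⟨t + 1, by omega, by simp [Nat.choose_self], by omega, by omega⟩
    · rw [rowBN_testBit_false m t (0 + 1) h2]
      apply rowBN_testBit_false
      rintro ⟨j, hj, ho, hle, he⟩
      have hj1 : j = t + 1 := by omega
      have hm : m = t + 1 := by omega
      exact h2 ⟨t, by omega, by simp [Nat.choose_self], by omega, by omega⟩
  · rw [if_pos (show (1:Nat) ≤ b by omega)]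
    by_cases h1 : ∃ j, j < t + 1 ∧ Nat.choose t j % 2 = 1 ∧ 2 * j ≤ m + t ∧ m + t - 2 * j = b - 1
    · by_cases h2 : ∃ j, j < t + 1 ∧ Nat.choose t j % 2 = 1 ∧ 2 * j ≤ m + t ∧ m + t - 2 * j = b + 1
      · -- both: the new bit is even (Pascal), result false
        rw [(rowBN_testBit m t (b - 1)).mpr h1, (rowBN_testBit m t (b + 1)).mpr h2, Bool.xor_self]
        apply rowBN_testBit_false
        rintro ⟨j, hj, ho, hle, he⟩
        obtain ⟨j1, hj1, ho1, hle1, he1⟩ := h1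
        obtain ⟨j2, hj2, ho2, hle2, he2⟩ := h2
        have hjj : j = j1 := by omega
        have hj12 : j1 = j2 + 1 := by omega
        subst hjj; subst hj12
        rw [Nat.choose_succ_succ'] at ho
        omega
      · rw [(rowBN_testBit m t (b - 1)).mpr h1, rowBN_testBit_false m t (b + 1) h2, Bool.xor_false]
        obtain ⟨j1, hj1, ho1, hle1, he1⟩ := h1
        apply (rowBN_testBit m (t + 1) b).mpr
        rcases j1 with _ | j'
        · exact ⟨0, by omega, by simp, by omega, by omega⟩
        · refine ⟨j' + 1, by omega, ?_, by omega, by omega⟩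
          rw [Nat.choose_succ_succ' t j']
          have hev : ¬ (Nat.choose t j' % 2 = 1) := by
            intro ho'
            exact h2 ⟨j', by omega, ho', by omega, by omega⟩
          omega
    · by_cases h2 : ∃ j, j < t + 1 ∧ Nat.choose t j % 2 = 1 ∧ 2 * j ≤ m + t ∧ m + t - 2 * j = b + 1
      · rw [rowBN_testBit_false m t (b - 1) h1, (rowBN_testBit m t (b + 1)).mpr h2, Bool.false_xor]
        obtain ⟨j2, hj2, ho2, hle2, he2⟩ := h2
        apply (rowBN_testBit m (t + 1) b).mpr
        refine ⟨j2 + 1, by omega, ?_, by omega, by omega⟩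
        rw [Nat.choose_succ_succ' t j2]
        have hev : ¬ (Nat.choose t (j2 + 1) % 2 = 1) := by
          intro ho'
          rcases Nat.lt_or_ge t (j2 + 1) with hlt | hge
          · rw [Nat.choose_eq_zero_of_lt hlt] at ho'; omega
          · exact h1 ⟨j2 + 1, by omega, ho', by omega, by omega⟩
        omega
      · rw [rowBN_testBit_false m t (b - 1) h1, rowBN_testBit_false m t (b + 1) h2, Bool.xor_self]
        apply rowBN_testBit_false
        rintro ⟨j, hj, ho, hle, he⟩
        rcases j with _ | j'
        · exact h1 ⟨0, by omega, by simp, by omega, by omega⟩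
        · rw [Nat.choose_succ_succ' t j'] at ho
          rcases Nat.mod_two_eq_zero_or_one (Nat.choose t (j' + 1)) with hp | hp
          · have hq : Nat.choose t j' % 2 = 1 := by omega
            exact h2 ⟨j', by omega, hq, by omega, by omega⟩
          · have hjt : j' + 1 ≤ t := by
              by_contra hgt
              rw [Nat.choose_eq_zero_of_lt (by omega)] at hp; omega
            exact h1 ⟨j' + 1, by omega, hp, by omega, by omega⟩

theorem loop_sim (target : Int) (m : Nat)
    (hstop : ∀ t', t' ≤ m + 1 → ((rowBN m t' : Int) < target) → t' ≤ m) :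
    ∀ (fuel t : Nat) (tmp : List Char), t ≤ m + 1 → m + 2 ≤ fuel + t →
    (t = 0 → tmp = [] ∧ ((rowBN m 0 : Int) ≤ target)) →
    (1 ≤ t → tmp = binStr (rowBN m (t - 1))) →
    serchLoop target fuel (binStr (rowBN m t)) tmp
      = fmtBin (if ((bLoop target m fuel (t : Int) (rowBN m t)).2 : Int) = target
                then (bLoop target m fuel (t : Int) (rowBN m t)).2
                else rowB m ((bLoop target m fuel (t : Int) (rowBN m t)).1 - 1)) := by
  intro fuel
  induction fuel with
  | zero => intro t tmp hle hfuel _ _; omega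
  | succ fuel ih =>
    intro t tmp hle hfuel h0 h1
    simp only [serchLoop, bLoop, parseBin_binStr]
    rcases lt_trichotomy target ((rowBN m t : Nat) : Int) with hlt | heq | hgt
    · rw [if_neg (by omega : ¬ ((rowBN m t : Nat) : Int) < target),
          if_neg (by omega : ¬ target = ((rowBN m t : Nat) : Int)), if_pos hlt]
      simp only
      rw [if_neg (by omega : ¬ ((rowBN m t : Nat) : Int) = target)]
      have ht1 : 1 ≤ t := by
        by_contra hc
        have h0' := h0 (by omega)
        have := h0'.2
        have ht0 : t = 0 := by omega
        rw [ht0] at hlt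
        omega
      have hc1 : ((t : Int) - 1) = ((t - 1 : Nat) : Int) := by omega
      rw [h1 ht1, hc1, rowB_cast, fmtBin_eq_binStr _ (rowBN_pos _ _)]
    · rw [if_neg (by omega : ¬ ((rowBN m t : Nat) : Int) < target), if_pos heq]
      simp only
      rw [if_pos (by omega : ((rowBN m t : Nat) : Int) = target)]
      exact (fmtBin_eq_binStr _ (rowBN_pos _ _)).symm
    · rw [if_pos (by omega : ((rowBN m t : Nat) : Int) < target),
          if_neg (by omega : ¬ target = ((rowBN m t : Nat) : Int)),
          if_neg (by omega : ¬ target < ((rowBN m t : Nat) : Int))]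
      have htm : t ≤ m := hstop t hle (by omega)
      rw [onestep_binStr _ (rowBN_pos m t), ← step_row m t htm]
      have hc1 : ((t : Int) + 1) = ((t + 1 : Nat) : Int) := by omega
      rw [hc1, rowB_cast]
      exact ih (t + 1) (binStr (rowBN m t)) (by omega) (by omega)
        (fun hc => absurd hc (by omega)) (fun _ => by simp)

-- ===== VERDICT (by name: the statement is the Claim_ definition above) =====
theorem serch_spec : Claim_equal_serch := by
  intro target hdom hpre
  simp only [Spec_serch, serch, serch_alt]
  have htn1 : 1 ≤ target.toNat := by unfold Pre_serch at hpre; omega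
  have hna : target.natAbs = target.toNat := by omega
  rw [hna]
  have hsz1 : 1 ≤ Nat.size target.toNat := Nat.lt_size.mpr (by simpa using htn1)
  set eN := Nat.size target.toNat - 1 with he
  have hb0 : ((Nat.size target.toNat : Int) - 1 + 1) = ((eN + 1 : Nat) : Int) := by omega
  rw [hb0, lLoopI_eq _ (by omega)]
  have hbn : ((eN + 1 : Nat) : Int).toNat = eN + 1 := by omega
  rw [hbn]
  have hdom' : target ≤ 2147483648 := by
    unfold Dom_serch pvDomInt at hdom
    simp at hdom
    omega
  have he31 : eN ≤ 32 := by
    have h1 : target.toNat < 2 ^ 33 := by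
      have h2 : (2147483648 : Int) < 2 ^ 33 := by norm_num
      omega
    have := Nat.size_le.mpr h1
    omega
  have hcongr : lLoop (eN + 1) 64 1 = lLoop (eN + 1) (eN + 2) 1 := by
    apply lLoop_congr
    · have h1 : eN + 1 < 2 ^ (eN + 1) := Nat.lt_two_pow_self
      have h2 : (2 : Nat) ^ (eN + 1) ≤ 2 ^ 64 := Nat.pow_le_pow_right (by norm_num) (by omega)
      omega
    · have := Nat.lt_two_pow_self (n := eN + 2)
      omega
  rw [hcongr]
  set L := lLoop (eN + 1) (eN + 2) 1 with hLdef
  obtain ⟨hinit, hstart⟩ := init_equiv target hpre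
  rw [← he, ← hLdef] at hinit hstart
  obtain ⟨hs, ⟨j', hj'⟩, hhalf⟩ := dbl_lLoop (eN + 1) (eN + 2) 0 (by simp)
  rw [pow_zero] at hj' hhalf
  rw [← hLdef] at hj' hhalf
  have hLgt : eN + 1 < L := by
    rw [hLdef]
    apply lLoop_gt
    have := Nat.lt_two_pow_self (n := eN + 2)
    omega
  have hj1 : 1 ≤ j' := by
    by_contra hc
    have hz : j' = 0 := by omega
    rw [hz] at hj'
    omega
  have hL2 : L = 2 * (L / 2) := by
    rcases j' with _ | j''
    · omega
    · have h2 : L = 2 * 2 ^ j'' := by rw [hj']; ring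
      omega
  set m := L / 2 - 1 with hmdef
  have hmt : (((L / 2 : Nat) : Int) - 1).toNat = m := by omega
  rw [hmt]
  have hme : m ≤ eN := by omega
  have he2m : eN ≤ 2 * m := by omega
  have hstop : ∀ t', t' ≤ m + 1 → ((rowBN m t' : Int) < target) → t' ≤ m := by
    intro t' _ hlt
    have h1 : rowBN m t' < target.toNat := by omega
    have h2 : Nat.size (rowBN m t') ≤ Nat.size target.toNat :=
      Nat.size_le.mpr (lt_trans h1 (Nat.lt_size_self _))
    rw [rowBN_size] at h2
    omega
  have h1m : (1 : Nat) <<< m = rowBN m 0 := by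
    rw [Nat.one_shiftLeft, rowBN_zero]
  rw [h1m] at hinit hstart ⊢
  have hmain := loop_sim target m hstop 64 0 []
    (by omega) (by omega)
    (fun _ => ⟨rfl, hstart⟩)
    (fun hc => absurd hc (by omega))
  have hc0 : ((0 : Nat) : Int) = (0 : Int) := rfl
  rw [← hc0] at *
  rw [hinit, hmain]
  split_ifs <;> rfl
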